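-- pv_equiv track=rewrite | github.com/living180/portage | pym/portage/__init__.py | _prune_incremental
-- ===== SOURCE A (Python) =====
-- def _prune_incremental(split):
-- 	"""
-- 	Prune off any parts of an incremental variable that are
-- 	made irrelevant by the latest occuring * or -*. This
-- 	could be more aggressive but that might be confusing
-- 	and the point is just to reduce noise a bit.
-- 	"""
-- 	for i, x in enumerate(reversed(split)):
-- 		if x == '*':
-- 			split = split[-i-1:]
-- 			break
-- 		elif x == '-*':
-- 			if i == 0:
-- 				split = []
-- 			else:
-- 				split = split[-i:]
-- 			break
-- 	return split
-- ===== SOURCE B (Python) =====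
-- def _prune_incremental(split):
--     idxs = [i for i, x in enumerate(split) if x in ('*', '-*')]
--     if not idxs:
--         return split
--     j = idxs[-1]
--     return split[j:] if split[j] == '*' else split[j+1:]
-- ===== Notes on version B (the rewrite author's own statement) =====
-- stated objective: simpler
-- what changed: Replaces the reverse-iterate-with-break and negative-index slicing (-i-1 / -i) by a single forward scan collecting the positions of '*'/'-*' and slicing once at the last collected position.
import Mathlib
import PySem

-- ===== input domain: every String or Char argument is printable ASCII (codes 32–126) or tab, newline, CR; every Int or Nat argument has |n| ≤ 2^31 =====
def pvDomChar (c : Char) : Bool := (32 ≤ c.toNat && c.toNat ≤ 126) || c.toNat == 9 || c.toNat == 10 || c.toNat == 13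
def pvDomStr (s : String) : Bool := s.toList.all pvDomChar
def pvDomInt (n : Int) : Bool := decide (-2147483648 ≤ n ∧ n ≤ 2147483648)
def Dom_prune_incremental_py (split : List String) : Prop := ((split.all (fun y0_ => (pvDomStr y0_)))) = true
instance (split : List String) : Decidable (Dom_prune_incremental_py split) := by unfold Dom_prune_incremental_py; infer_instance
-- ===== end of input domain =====

-- B replaces A's reverse loop with negative-index slicing by a forward scan that
-- collects the positions of '*'/'-*' and slices once at the last one (objective: simpler).

-- ===== PORT A =====
-- loop over enumerate(reversed(split)) with break; `orig` is the unreassigned `split`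
def pruneGoA (orig : List String) : List String → Nat → List String
  | [], _ => orig
  | x :: rest, i =>
    if x = "*" then PySem.List.slice orig (some (-(i : Int) - 1)) none
    else if x = "-*" then
      (if i = 0 then ([] : List String) else PySem.List.slice orig (some (-(i : Int))) none)
    else pruneGoA orig rest (i + 1)

def prune_incremental_py (split : List String) : List String :=
  pruneGoA split split.reverse 0

-- ===== PORT B =====
def prune_incremental_py_alt (split : List String) : List String :=
  let idxs := (PySem.List.enumerate split 0).foldl
      (fun acc p => if p.2 = "*" ∨ p.2 = "-*" then acc ++ [p.1] else acc) ([] : List Int)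
  match idxs.getLast? with
  | none => split
  | some j =>
      if PySem.List.pyGet? split j = some "*" then PySem.List.slice split (some j) none
      else PySem.List.slice split (some (j + 1)) none

-- ===== PRECONDITION & SPEC =====
def Spec_prune_incremental_py (split : List String) (out : List String) : Prop := out = prune_incremental_py_alt split
instance (split : List String) (out : List String) : Decidable (Spec_prune_incremental_py split out) := by unfold Spec_prune_incremental_py; infer_instance

-- ===== CLAIM (what is proved, stated in full; the proofs are below) =====
def Claim_equal_prune_incremental_py : Prop := ∀ (split : List String), Dom_prune_incremental_py split → Spec_prune_incremental_py split (prune_incremental_py split)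

-- ===== LEMMAS AND PROOFS =====

def idxsOf (l : List String) : List Int :=
  (PySem.List.enumerate l 0).foldl
    (fun acc p => if p.2 = "*" ∨ p.2 = "-*" then acc ++ [p.1] else acc) ([] : List Int)

def pick (whole pre : List String) : List String :=
  match (idxsOf pre).getLast? with
  | none => whole
  | some j =>
      if PySem.List.pyGet? pre j = some "*" then PySem.List.slice whole (some j) none
      else PySem.List.slice whole (some (j + 1)) none

lemma idxsOf_concat (l : List String) (x : String) :
    idxsOf (l ++ [x]) = if x = "*" ∨ x = "-*" then idxsOf l ++ [(l.length : Int)] else idxsOf l := by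
  simp [idxsOf, PySem.List.enumerate_append, List.foldl_append, PySem.List.enumerate]

lemma mem_idxsOf (l : List String) (j : Int) (h : j ∈ idxsOf l) : 0 ≤ j ∧ j < l.length := by
  induction l using List.reverseRecOn with
  | nil => simp [idxsOf, PySem.List.enumerate] at h
  | append_singleton l x ih =>
      rw [idxsOf_concat] at h
      have hlen : ((l ++ [x]).length : Int) = (l.length : Int) + 1 := by
        simp
      split at h
      · rcases List.mem_append.mp h with h' | h'
        · obtain ⟨h1, h2⟩ := ih h'; omega
        · simp at h'; omega
      · obtain ⟨h1, h2⟩ := ih h; omega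

lemma pruneGoA_cons (orig : List String) (x : String) (rest : List String) (i : Nat) :
    pruneGoA orig (x :: rest) i =
      if x = "*" then PySem.List.slice orig (some (-(i : Int) - 1)) none
      else if x = "-*" then
        (if i = 0 then ([] : List String) else PySem.List.slice orig (some (-(i : Int))) none)
      else pruneGoA orig rest (i + 1) := rfl

lemma key (pre suf : List String) :
    pruneGoA (pre ++ suf) pre.reverse suf.length = pick (pre ++ suf) pre := by
  induction pre using List.reverseRecOn generalizing suf with
  | nil => simp [pruneGoA, pick, idxsOf, PySem.List.enumerate]
  | append_singleton l x ih =>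
      have hrev : (l ++ [x]).reverse = x :: l.reverse := by simp
      rw [hrev, pruneGoA_cons]
      by_cases hstar : x = "*"
      · subst hstar
        rw [if_pos rfl]
        have h1 : (-(suf.length : Int) - 1) = -((suf.length + 1 : Nat) : Int) := by push_cast; ring
        rw [h1, PySem.List.slice_from_neg_natCast _ _ (Nat.succ_pos _)]
        have hlen : (l ++ ["*"] ++ suf).length - (suf.length + 1) = l.length := by
          simp
        rw [hlen]
        rw [pick, idxsOf_concat, if_pos (Or.inl rfl), List.getLast?_concat]
        have hx : (l ++ ["*"])[l.length]? = some "*" := by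
          rw [List.getElem?_append_right (le_refl _)]; simp
        simp [PySem.List.slice_from_natCast]
      · by_cases hminus : x = "-*"
        · subst hminus
          rw [if_neg hstar, if_pos rfl]
          have hpick : pick (l ++ ["-*"] ++ suf) (l ++ ["-*"]) =
              (l ++ ["-*"] ++ suf).drop (l.length + 1) := by
            rw [pick, idxsOf_concat, if_pos (Or.inr rfl), List.getLast?_concat]
            have hx : (l ++ ["-*"])[l.length]? = some "-*" := by
              rw [List.getElem?_append_right (le_refl _)]; simp
            have h2 : ((l.length : Int) + 1) = ((l.length + 1 : Nat) : Int) := by push_cast; ring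
            simp only [PySem.List.pyGet?_natCast, hx, Option.some.injEq]
            rw [if_neg (by simp), h2, PySem.List.slice_from_natCast]
          rw [hpick]
          rcases suf with _ | ⟨y, suf'⟩
          · simp
          · rw [if_neg (by simp)]
            have h2 : (-(((y :: suf').length : Nat) : Int)) = -((suf'.length + 1 : Nat) : Int) := by
              push_cast; simp
            rw [h2, PySem.List.slice_from_neg_natCast _ _ (Nat.succ_pos _)]
            congr 1
            simp
            omega
        · rw [if_neg hstar, if_neg hminus]
          have hassoc : l ++ [x] ++ suf = l ++ (x :: suf) := by simp
          have hlen : suf.length + 1 = (x :: suf).length := by simp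
          rw [hassoc, hlen, ih (x :: suf)]
          rw [pick, pick, idxsOf_concat, if_neg (by tauto : ¬ (x = "*" ∨ x = "-*"))]
          rcases hlast : (idxsOf l).getLast? with _ | j
          · simp
          · have hj := mem_idxsOf l j (List.mem_of_getLast? hlast)
            have hget : PySem.List.pyGet? (l ++ [x]) j = PySem.List.pyGet? l j := by
              obtain ⟨k, hk⟩ : ∃ k : Nat, j = (k : Int) := ⟨j.toNat, by omega⟩
              subst hk
              rw [PySem.List.pyGet?_natCast, PySem.List.pyGet?_natCast,
                List.getElem?_append_left (by exact_mod_cast hj.2)]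
            simp [hget]

-- ===== VERDICT (by name: the statement is the Claim_ definition above) =====
theorem prune_incremental_py_spec : Claim_equal_prune_incremental_py := by
  intro split _
  unfold Spec_prune_incremental_py
  have h := key split []
  simp only [List.append_nil, List.length_nil] at h
  rw [prune_incremental_py, h]
  rfl
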